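-- pv_equiv track=rewrite | github.com/nikhil3991/Coding_qstns | Arrays/number of pairs.py | solve
-- ===== SOURCE A (Python) =====
-- def solve(n):
--     if n==0:
--         return 0
--     if n==1:
--         return 1
--     if n==2:
--         return 2
--     return solve(n-1)+(n-1)*solve(n-2)
-- ===== SOURCE B (Python) =====
-- def solve(n):
--     if n == 0:
--         return 0
--     if n == 1:
--         return 1
--     a, b = 1, 2
--     for i in range(3, n + 1):
--         a, b = b, b + (i - 1) * a
--     return b
-- ===== Notes on version B (the rewrite author's own statement) =====
-- stated objective: faster
-- what changed: Replaced the naive double recursion with an iterative bottom-up loop carrying the last two values; intended as faster (the probe measured A timing out beyond n=16 while B answers instantly, so the speed-up could not be formally confirmed at a common size).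
import Mathlib
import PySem

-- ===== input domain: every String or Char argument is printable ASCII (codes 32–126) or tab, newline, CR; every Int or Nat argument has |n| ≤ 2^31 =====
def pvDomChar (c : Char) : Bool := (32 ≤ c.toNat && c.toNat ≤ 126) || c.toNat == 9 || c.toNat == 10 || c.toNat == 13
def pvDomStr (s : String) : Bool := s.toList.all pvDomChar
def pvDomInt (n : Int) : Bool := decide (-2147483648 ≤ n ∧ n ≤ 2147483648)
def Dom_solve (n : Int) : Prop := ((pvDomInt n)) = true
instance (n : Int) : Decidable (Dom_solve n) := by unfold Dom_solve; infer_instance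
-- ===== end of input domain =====

-- B replaces A's double recursion by a bottom-up loop carrying the last two values (intended as faster; a timing run measured A timing out where B returns instantly).


-- ===== PORT A =====
-- A's recursion, transliterated on Nat (A raises for n < 0; those inputs are outside Pre_)
def solveA : Nat → Int
  | 0 => 0
  | 1 => 1
  | 2 => 2
  | (m+3) => solveA (m+2) + (((m:Int)+3) - 1) * solveA (m+1)

def solve (n : Int) : Int := solveA n.toNat

-- ===== PORT B =====
def solve_alt (n : Int) : Int :=
  if n = 0 then 0
  else if n = 1 then 1
  else
    ((PySem.List.pyRange 3 (n+1) 1).foldl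
      (fun (p : Int × Int) i => (p.2, p.2 + (i - 1) * p.1)) (1, 2)).2

-- ===== PRECONDITION & SPEC =====
-- Pre_ excludes negative n, on which Python A recurses without end (RecursionError)
def Pre_solve (n : Int) : Prop := 0 ≤ n
instance (n : Int) : Decidable (Pre_solve n) := by unfold Pre_solve; infer_instance
def pvWitness_solve : Int := (5)
def Spec_solve (n : Int) (out : Int) : Prop := out = solve_alt n
instance (n : Int) (out : Int) : Decidable (Spec_solve n out) := by unfold Spec_solve; infer_instance

-- ===== CLAIM (what is proved, stated in full; the proofs are below) =====
def Claim_equal_solve : Prop := ∀ (n : Int), Dom_solve n → Pre_solve n → Spec_solve n (solve n)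

-- ===== LEMMAS AND PROOFS =====

-- loop invariant: after the fold up to m, the pair is (solveA (m-1), solveA m)
theorem solve_loop_inv (m : Nat) (hm : 2 ≤ m) :
    (PySem.List.pyRange 3 ((m:Int)+1) 1).foldl
      (fun (p : Int × Int) i => (p.2, p.2 + (i - 1) * p.1)) (1, 2)
      = (solveA (m-1), solveA m) := by
  induction m with
  | zero => omega
  | succ m ih =>
    rcases Nat.lt_or_ge m 2 with h | h
    · interval_cases m
      · omega
      · simp [PySem.List.pyRange_one_eq_nil, solveA]
    · have hsplit : PySem.List.pyRange 3 ((m:Int)+1+1) 1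
          = PySem.List.pyRange 3 ((m:Int)+1) 1 ++ [(m:Int)+1] := by
        have := PySem.List.pyRange_one_succ_right (a := 3) (b := (m:Int)+1) (by omega)
        simpa using this
      push_cast
      rw [hsplit, List.foldl_append, ih h]
      simp only [List.foldl_cons, List.foldl_nil]
      obtain ⟨k, rfl⟩ : ∃ k, m = k + 2 := ⟨m - 2, by omega⟩
      have hrec : solveA (k+3) = solveA (k+2) + (((k:Int)+3) - 1) * solveA (k+1) := rfl
      show (solveA (k+2), solveA (k+2) + (((k+2:Nat):Int)+1-1) * solveA (k+2-1)) = (solveA (k+2), solveA (k+2+1))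
      have h1 : k+2-1 = k+1 := rfl
      have h2 : k+2+1 = k+3 := rfl
      rw [h1, h2, hrec]
      push_cast
      ring_nf

-- ===== VERDICT (by name: the statement is the Claim_ definition above) =====
theorem solve_spec : Claim_equal_solve := by
  intro n _ hpre
  have hn : (0:Int) ≤ n := hpre
  unfold Spec_solve solve solve_alt
  obtain ⟨m, rfl⟩ : ∃ m : Nat, n = (m:Int) := ⟨n.toNat, by omega⟩
  rcases Nat.lt_or_ge m 2 with h | h
  · interval_cases m <;> simp [solveA]
  · have h0 : ¬ ((m:Int) = 0) := by omega
    have h1 : ¬ ((m:Int) = 1) := by omega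
    rw [if_neg h0, if_neg h1, Int.toNat_natCast, solve_loop_inv m h]
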